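-- pv_equiv track=rewrite | github.com/NotHotTryHard/YaAlgs6.0 | HW2/H.py | func
-- ===== SOURCE A (Python) =====
-- def func(n, nums):
--     left, right = [], []
--     leftnum, rightnum = 0, 0
--     leftcarry, rightcarry = 0, 0
--     for i in range(n):
--         left.append(leftcarry)
--         leftnum += nums[i]
--         leftcarry += leftnum
--
--         right.append(rightcarry)
--         rightnum += nums[n - i - 1]
--         rightcarry += rightnum
--
--     right.reverse()
--
--
--     vals = [left[i] + right[i] for i in range(n)]
--     return min(vals)
-- ===== SOURCE B (Python) =====
-- def func(n, nums):
--     # cost of gathering the first n items at index 0, and their total weight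
--     base = 0
--     total = 0
--     for k in range(n):
--         base += k * nums[k]
--         total += nums[k]
--     # sweep the pivot rightward, updating the cost by its delta
--     best = base
--     prefix = 0
--     cur = base
--     for i in range(1, n):
--         prefix += nums[i - 1]
--         cur += 2 * prefix - total
--         if cur < best:
--             best = cur
--     return best
-- ===== Notes on version B (the rewrite author's own statement) =====
-- stated objective: alternative
-- what changed: Instead of building two O(n) carry tables (left/right), reversing one, materialising their elementwise sum and taking min(), B computes the pivot-0 cost once and sweeps the pivot rightward with a constant-space delta recurrence (cur += 2*prefix - total), taking the min on the fly; it trades the tables for three scalar accumulators.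
import Mathlib
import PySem

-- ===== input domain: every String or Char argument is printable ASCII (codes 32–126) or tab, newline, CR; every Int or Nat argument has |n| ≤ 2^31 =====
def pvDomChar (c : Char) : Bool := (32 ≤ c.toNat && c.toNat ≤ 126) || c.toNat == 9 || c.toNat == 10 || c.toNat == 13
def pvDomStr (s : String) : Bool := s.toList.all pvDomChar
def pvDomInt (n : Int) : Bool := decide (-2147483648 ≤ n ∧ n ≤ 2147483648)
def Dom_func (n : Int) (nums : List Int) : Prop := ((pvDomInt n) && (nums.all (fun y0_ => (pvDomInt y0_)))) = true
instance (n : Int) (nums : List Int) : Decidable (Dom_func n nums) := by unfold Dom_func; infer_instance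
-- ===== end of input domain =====

-- B replaces A's two O(n) carry tables + elementwise sum + min() by a constant-space
-- left-to-right sweep updating one running pivot cost via its delta (cur += 2*pfx - total).

-- ===== PORT A =====
def func (n : Int) (nums : List Int) : Int :=
  let st := (PySem.List.pyRange 0 n 1).foldl
    (fun (st : List Int × List Int × Int × Int × Int × Int) i =>
      match st with
      | (left, right, leftnum, rightnum, leftcarry, rightcarry) =>
        let left := left ++ [leftcarry]
        let leftnum := leftnum + PySem.List.pyGetD nums i 0
        let leftcarry := leftcarry + leftnum
        let right := right ++ [rightcarry]
        let rightnum := rightnum + PySem.List.pyGetD nums (n - i - 1) 0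
        let rightcarry := rightcarry + rightnum
        (left, right, leftnum, rightnum, leftcarry, rightcarry))
    ([], [], 0, 0, 0, 0)
  let left := st.1
  let right := st.2.1.reverse
  let vals := (PySem.List.pyRange 0 n 1).map
    (fun i => PySem.List.pyGetD left i 0 + PySem.List.pyGetD right i 0)
  (PySem.List.min? vals (fun x => x)).getD 0

-- ===== PORT B =====
def func_alt (n : Int) (nums : List Int) : Int :=
  let bt := (PySem.List.pyRange 0 n 1).foldl
    (fun (bt : Int × Int) k =>
      (bt.1 + k * PySem.List.pyGetD nums k 0, bt.2 + PySem.List.pyGetD nums k 0))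
    (0, 0)
  let total := bt.2
  let st := (PySem.List.pyRange 1 n 1).foldl
    (fun (st : Int × Int × Int) i =>
      let pfx := st.2.1 + PySem.List.pyGetD nums (i - 1) 0
      let cur := st.2.2 + 2 * pfx - total
      (if cur < st.1 then cur else st.1, pfx, cur))
    (bt.1, 0, bt.1)
  st.1

-- ===== PRECONDITION & SPEC =====
-- Pre_ excludes exactly the inputs where A raises: n <= 0 (min of the empty list,
-- ValueError) and n > len(nums) (IndexError).
def Pre_func (n : Int) (nums : List Int) : Prop := 1 ≤ n ∧ n ≤ nums.length
instance (n : Int) (nums : List Int) : Decidable (Pre_func n nums) := by unfold Pre_func; infer_instance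
def pvWitness_func : Int × List Int := (2, [3, -1])

def Spec_func (n : Int) (nums : List Int) (out : Int) : Prop := out = func_alt n nums
instance (n : Int) (nums : List Int) (out : Int) : Decidable (Spec_func n nums out) := by unfold Spec_func; infer_instance

-- ===== CLAIM (what is proved, stated in full; the proofs are below) =====
def Claim_equal_func : Prop := ∀ (n : Int) (nums : List Int), Dom_func n nums → Pre_func n nums → Spec_func n nums (func n nums)

-- ===== LEMMAS AND PROOFS =====

def pvA (nums : List Int) (k : ℕ) : Int := nums.getD k 0
def pvL (nums : List Int) (i : ℕ) : Int :=
  ∑ k ∈ Finset.range i, ((i : Int) - (k : Int)) * pvA nums k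
def pvR (n : Int) (nums : List Int) (i : ℕ) : Int :=
  ∑ k ∈ Finset.range i, ((i : Int) - (k : Int)) * PySem.List.pyGetD nums (n - (k : Int) - 1) 0
lemma pv_carry_step (f : ℕ → Int) (m : ℕ) :
    (∑ k ∈ Finset.range m, ((m : Int) - k) * f k) + ∑ k ∈ Finset.range (m + 1), f k
      = ∑ k ∈ Finset.range (m + 1), (((m : Int) + 1) - k) * f k := by
  rw [Finset.sum_range_succ, Finset.sum_range_succ (f := fun k => (((m:Int)+1) - k) * f k)]
  have : ∑ k ∈ Finset.range m, (((m:Int)+1) - k) * f k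
      = ∑ k ∈ Finset.range m, (((m:Int) - k) * f k + f k) :=
    Finset.sum_congr rfl (fun k _ => by ring)
  rw [this, Finset.sum_add_distrib]
  ring

lemma pv_stateA (n : Int) (nums : List Int) (m : ℕ) :
    (PySem.List.pyRange 0 (m : Int) 1).foldl
      (fun (st : List Int × List Int × Int × Int × Int × Int) i =>
        match st with
        | (left, right, leftnum, rightnum, leftcarry, rightcarry) =>
          let left := left ++ [leftcarry]
          let leftnum := leftnum + PySem.List.pyGetD nums i 0
          let leftcarry := leftcarry + leftnum
          let right := right ++ [rightcarry]
          let rightnum := rightnum + PySem.List.pyGetD nums (n - i - 1) 0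
          let rightcarry := rightcarry + rightnum
          (left, right, leftnum, rightnum, leftcarry, rightcarry))
      ([], [], 0, 0, 0, 0)
    = ((List.range m).map (pvL nums), (List.range m).map (pvR n nums),
       ∑ k ∈ Finset.range m, pvA nums k,
       ∑ k ∈ Finset.range m, PySem.List.pyGetD nums (n - (k : Int) - 1) 0,
       pvL nums m, pvR n nums m) := by
  induction m with
  | zero => simp [pvL, pvR]
  | succ m ih =>
    rw [show ((m + 1 : ℕ) : Int) = (m : Int) + 1 by push_cast; ring,
        PySem.List.pyRange_one_succ_right (by positivity), List.foldl_append, ih]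
    simp only [List.foldl_cons, List.foldl_nil, List.range_succ, List.map_append, List.map_cons,
      List.map_nil, PySem.List.pyGetD_natCast]
    refine Prod.ext rfl (Prod.ext rfl (Prod.ext ?_ (Prod.ext ?_ (Prod.ext ?_ ?_))))
    · simp [Finset.sum_range_succ, pvA]
    · simp [Finset.sum_range_succ]
    · simp only [pvL, pvA]
      push_cast
      rw [← pv_carry_step (fun k => nums.getD k 0) m, Finset.sum_range_succ]
    · simp only [pvR]
      push_cast
      rw [← pv_carry_step (fun k => PySem.List.pyGetD nums (n - (k : Int) - 1) 0) m,
          Finset.sum_range_succ]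

def pvCost (nums : List Int) (n' i : ℕ) : Int :=
  ∑ k ∈ Finset.range n', |(i : Int) - (k : Int)| * pvA nums k

lemma pv_split (f : ℕ → Int) (m n : ℕ) (h : m ≤ n) :
    ∑ k ∈ Finset.range n, f k
      = (∑ k ∈ Finset.range m, f k) + ∑ j ∈ Finset.range (n - m), f (m + j) := by
  rw [← Finset.sum_range_add, Nat.add_sub_cancel' h]

lemma pv_val_eq_cost (n : Int) (nums : List Int) (n' i : ℕ)
    (hn : n = (n' : Int)) (hi : i < n') :
    pvL nums i + pvR n nums (n' - 1 - i) = pvCost nums n' i := by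
  have hb : ∀ k : ℕ, k < n' - 1 - i →
      PySem.List.pyGetD nums (n - (k : Int) - 1) 0 = pvA nums (n' - 1 - k) := by
    intro k hk
    have h1 : n - (k : Int) - 1 = ((n' - 1 - k : ℕ) : Int) := by
      subst hn; omega
    rw [h1, PySem.List.pyGetD_natCast, pvA]
  -- rewrite pvR with reflected indices
  have hR : pvR n nums (n' - 1 - i)
      = ∑ j ∈ Finset.range (n' - 1 - i), ((j : Int) + 1) * pvA nums (i + 1 + j) := by
    rw [pvR, Finset.sum_congr rfl (fun k hk => by
      rw [hb k (Finset.mem_range.mp hk)])]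
    rw [← Finset.sum_range_reflect]
    refine Finset.sum_congr rfl (fun j hj => ?_)
    have hj' := Finset.mem_range.mp hj
    have e1 : ((n' - 1 - i : ℕ) : Int) - ((n' - 1 - i - 1 - j : ℕ) : Int) = (j : Int) + 1 := by
      omega
    have e2 : n' - 1 - (n' - 1 - i - 1 - j) = i + 1 + j := by omega
    rw [e1, e2]
  have hcost : pvCost nums n' i
      = (∑ k ∈ Finset.range (i + 1), |(i : Int) - k| * pvA nums k)
        + ∑ j ∈ Finset.range (n' - (i + 1)), |(i : Int) - ((i + 1 + j : ℕ) : Int)| * pvA nums (i + 1 + j) := by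
    rw [pvCost, pv_split _ (i + 1) n' (by omega)]
  rw [hcost, hR, pvL]
  have h3 : n' - (i + 1) = n' - 1 - i := by omega
  rw [h3]
  congr 1
  · rw [Finset.sum_range_succ]
    have h0 : |(i : Int) - (i : Int)| * pvA nums i = 0 := by simp
    rw [h0, add_zero]
    refine Finset.sum_congr rfl (fun k hk => ?_)
    have hk' := Finset.mem_range.mp hk
    rw [abs_of_nonneg (by omega : (0:Int) ≤ (i:Int) - (k:Int))]
  · refine Finset.sum_congr rfl (fun j hj => ?_)
    have : |(i : Int) - ((i + 1 + j : ℕ) : Int)| = (j : Int) + 1 := by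
      push_cast
      rw [abs_of_nonpos (by omega)]
      ring
    rw [this]

lemma pv_delta (nums : List Int) (n' i : ℕ) (h : i + 1 ≤ n') :
    pvCost nums n' (i + 1)
      = pvCost nums n' i + 2 * (∑ k ∈ Finset.range (i + 1), pvA nums k)
          - ∑ k ∈ Finset.range n', pvA nums k := by
  simp only [pvCost]
  rw [pv_split (fun k => |(((i+1:ℕ)):Int) - k| * pvA nums k) (i+1) n' h,
      pv_split (fun k => |(i:Int) - k| * pvA nums k) (i+1) n' h,
      pv_split (fun k => pvA nums k) (i+1) n' h]
  have e1 : ∀ k ∈ Finset.range (i+1), |(((i+1:ℕ)):Int) - k| * pvA nums k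
      = |(i:Int) - k| * pvA nums k + pvA nums k := by
    intro k hk
    have hk' := Finset.mem_range.mp hk
    rw [abs_of_nonneg (by omega : (0:Int) ≤ ((i+1:ℕ):Int) - k),
        abs_of_nonneg (by omega : (0:Int) ≤ (i:Int) - k)]
    push_cast; ring
  have e2 : ∀ j ∈ Finset.range (n' - (i+1)), |(((i+1:ℕ)):Int) - ((i+1+j:ℕ):Int)| * pvA nums (i+1+j)
      = |(i:Int) - ((i+1+j:ℕ):Int)| * pvA nums (i+1+j) - pvA nums (i+1+j) := by
    intro j _
    rw [abs_of_nonpos (by push_cast; omega : ((i+1:ℕ):Int) - ((i+1+j:ℕ):Int) ≤ 0),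
        abs_of_nonpos (by push_cast; omega : (i:Int) - ((i+1+j:ℕ):Int) ≤ 0)]
    push_cast; ring
  rw [Finset.sum_congr rfl e1, Finset.sum_congr rfl e2,
      Finset.sum_add_distrib, Finset.sum_sub_distrib]
  push_cast
  ring

lemma pv_stateB1 (nums : List Int) (m : ℕ) :
    (PySem.List.pyRange 0 (m : Int) 1).foldl
      (fun (bt : Int × Int) k =>
        (bt.1 + k * PySem.List.pyGetD nums k 0, bt.2 + PySem.List.pyGetD nums k 0))
      (0, 0)
    = (∑ k ∈ Finset.range m, (k : Int) * pvA nums k, ∑ k ∈ Finset.range m, pvA nums k) := by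
  induction m with
  | zero => simp
  | succ m ih =>
    rw [show ((m + 1 : ℕ) : Int) = (m : Int) + 1 by push_cast; ring,
        PySem.List.pyRange_one_succ_right (by positivity), List.foldl_append, ih]
    simp [Finset.sum_range_succ, pvA]

lemma pv_base_eq_cost0 (nums : List Int) (n' : ℕ) :
    ∑ k ∈ Finset.range n', (k : Int) * pvA nums k = pvCost nums n' 0 := by
  rw [pvCost]
  refine Finset.sum_congr rfl (fun k _ => ?_)
  rw [show |((0:ℕ):Int) - (k:Int)| = (k:Int) by
    rw [Nat.cast_zero, zero_sub, abs_neg, abs_of_nonneg (by positivity)]]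

lemma pv_stateB2 (nums : List Int) (n' : ℕ) (m : ℕ) (h1 : 1 ≤ m) (hm : m ≤ n') :
    (PySem.List.pyRange 1 (m : Int) 1).foldl
      (fun (st : Int × Int × Int) i =>
        let pfx := st.2.1 + PySem.List.pyGetD nums (i - 1) 0
        let cur := st.2.2 + 2 * pfx - (∑ k ∈ Finset.range n', pvA nums k)
        (if cur < st.1 then cur else st.1, pfx, cur))
      (pvCost nums n' 0, 0, pvCost nums n' 0)
    = (((List.range (m - 1)).map (fun j => pvCost nums n' (j + 1))).foldl min (pvCost nums n' 0),
       ∑ k ∈ Finset.range (m - 1), pvA nums k,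
       pvCost nums n' (m - 1)) := by
  induction m with
  | zero => omega
  | succ m ih =>
    rcases Nat.eq_or_lt_of_le h1 with h | h
    · simp [← h, PySem.List.pyRange_one_eq_nil (by omega : (1:Int) ≤ 1)]
    · have hm1 : 1 ≤ m := by omega
      have hmn : m ≤ n' := by omega
      rw [show ((m + 1 : ℕ) : Int) = (m : Int) + 1 by push_cast; ring,
          PySem.List.pyRange_one_succ_right (by exact_mod_cast hm1), List.foldl_append,
          ih hm1 hmn]
      simp only [List.foldl_cons, List.foldl_nil]
      have hidx : (m : Int) - 1 = ((m - 1 : ℕ) : Int) := by omega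
      have hpfx : (∑ k ∈ Finset.range (m - 1), pvA nums k) + PySem.List.pyGetD nums ((m:Int) - 1) 0
          = ∑ k ∈ Finset.range m, pvA nums k := by
        rw [hidx, PySem.List.pyGetD_natCast,
            show m = (m - 1) + 1 by omega, Finset.sum_range_succ]
        simp [pvA]
      have hcur : pvCost nums n' (m - 1) + 2 * ((∑ k ∈ Finset.range (m - 1), pvA nums k) + PySem.List.pyGetD nums ((m:Int) - 1) 0)
            - (∑ k ∈ Finset.range n', pvA nums k)
          = pvCost nums n' m := by
        rw [hpfx, show m = (m - 1) + 1 by omega]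
        rw [pv_delta nums n' (m - 1) (by omega)]
        rw [show m - 1 + 1 = m by omega]
      refine Prod.ext ?_ (Prod.ext (by rw [Nat.add_sub_cancel, hpfx]) ?_)
      · simp only [Nat.add_sub_cancel]
        rw [show m = (m - 1) + 1 by omega, List.range_succ, List.map_append, List.map_cons,
            List.map_nil, List.foldl_append, List.foldl_cons, List.foldl_nil,
            show m - 1 + 1 = m by omega]
        simp only [hcur]
        rw [min_def]
        split_ifs <;> omega
      · simp only [Nat.add_sub_cancel]
        exact hcur


lemma pv_getD_map_range (f : ℕ → Int) (n k : ℕ) (h : k < n) :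
    ((List.range n).map f).getD k 0 = f k := by
  rw [List.getD_eq_getElem _ _ (by simpa using h)]
  simp

lemma pv_getD_rev_map_range (f : ℕ → Int) (n k : ℕ) (h : k < n) :
    ((List.range n).map f).reverse.getD k 0 = f (n - 1 - k) := by
  rw [List.getD_eq_getElem _ _ (by simpa using h), List.getElem_reverse]
  simp

lemma pv_funcA_eq (n : Int) (nums : List Int) (h : Pre_func n nums) :
    func n nums
      = (((List.range (n.toNat - 1)).map (fun j => pvCost nums n.toNat (j + 1))).foldl min
          (pvCost nums n.toNat 0)) := by
  obtain ⟨h1, h2⟩ := h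
  have hn : n = ((n.toNat : ℕ) : Int) := by omega
  have hpos : 1 ≤ n.toNat := by omega
  simp only [func]
  rw [hn, pv_stateA ((n.toNat : ℕ) : Int) nums n.toNat]
  simp only
  rw [PySem.List.pyRange_zero_nat, List.map_map]
  have hmap : (List.range n.toNat).map
        ((fun i => PySem.List.pyGetD ((List.range n.toNat).map (pvL nums)) i 0 +
          PySem.List.pyGetD (((List.range n.toNat).map (pvR (((n.toNat : ℕ) : Int)) nums)).reverse) i 0)
         ∘ (fun k : ℕ => (k : Int)))
      = (List.range n.toNat).map (fun k => pvCost nums n.toNat k) := by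
    refine List.map_congr_left (fun k hk => ?_)
    have hk' := List.mem_range.mp hk
    simp only [Function.comp, PySem.List.pyGetD_natCast]
    rw [pv_getD_map_range _ _ _ hk', pv_getD_rev_map_range _ _ _ hk']
    exact pv_val_eq_cost _ nums n.toNat k rfl hk'
  rw [hmap,
      show List.range n.toNat = 0 :: (List.range (n.toNat - 1)).map Nat.succ by
        rw [← List.range_succ_eq_map, show n.toNat - 1 + 1 = n.toNat by omega],
      List.map_cons, List.map_map, PySem.List.min?_id_cons, Option.getD_some]
  simp only [Function.comp_def, Nat.succ_eq_add_one, Int.toNat_natCast]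

lemma pv_funcB_eq (n : Int) (nums : List Int) (h : Pre_func n nums) :
    func_alt n nums
      = (((List.range (n.toNat - 1)).map (fun j => pvCost nums n.toNat (j + 1))).foldl min
          (pvCost nums n.toNat 0)) := by
  obtain ⟨h1, h2⟩ := h
  have hn : n = ((n.toNat : ℕ) : Int) := by omega
  have hpos : 1 ≤ n.toNat := by omega
  simp only [func_alt]
  rw [hn, pv_stateB1 nums n.toNat]
  simp only [pv_base_eq_cost0]
  rw [pv_stateB2 nums n.toNat n.toNat hpos le_rfl]
  simp only [Int.toNat_natCast]

-- ===== VERDICT (by name: the statement is the Claim_ definition above) =====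
theorem func_spec : Claim_equal_func := by
  intro n nums _ hpre
  unfold Spec_func
  rw [pv_funcA_eq n nums hpre, pv_funcB_eq n nums hpre]
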